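-- pv_equiv track=rewrite | github.com/DevMarcosLima/lc-admin-backend | app/services/firestore_admin.py | _normalize_categories
-- ===== SOURCE A (Python) =====
-- from typing import Any
--
-- def _normalize_categories(values: list[Any]) -> list[str]:
--     normalized = [
--         _safe_str(item)
--         for item in values
--         if isinstance(item, str) and _safe_str(item)
--     ]
--     dedup: list[str] = []
--     seen: set[str] = set()
--     for item in normalized:
--         key = item.lower()
--         if key in seen:
--             continue
--         seen.add(key)
--         dedup.append(item)
--     return sorted(dedup, key=lambda value: value.lower())
--
-- def _safe_str(value: Any) -> str:
--     if value is None: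
--         return ""
--     return str(value).strip()
-- ===== SOURCE B (Python) =====
-- from typing import Any
--
--
-- def _normalize_categories(values: list[Any]) -> list[str]:
--     # One pass: maintain a list kept sorted by lowercase key with unique keys,
--     # inserting each stripped string at its position (first occurrence wins).
--     ordered: list[str] = []
--     for item in values:
--         if isinstance(item, str):
--             text = _safe_str(item)
--             if text:
--                 ordered = _insert_unique(text, text.lower(), ordered)
--     return ordered
--
--
-- def _insert_unique(text: str, key: str, ordered: list[str]) -> list[str]:
--     for i, existing in enumerate(ordered):
--         existing_key = existing.lower()
--         if existing_key == key:
--             return ordered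
--         if key < existing_key:
--             return ordered[:i] + [text] + ordered[i:]
--     return ordered + [text]
--
--
-- def _safe_str(value: Any) -> str:
--     if value is None:
--         return ""
--     return str(value).strip()
-- ===== Notes on version B (the rewrite author's own statement) =====
-- stated objective: alternative
-- what changed: B replaces A's three stages (filter comprehension, seen-set first-occurrence dedup, final keyed sort) by a single pass that maintains one list kept sorted by lowercase key with unique keys, inserting each stripped string at its position (insertion sort with dedup-on-insert; no set, no final sort).
import Mathlib
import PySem

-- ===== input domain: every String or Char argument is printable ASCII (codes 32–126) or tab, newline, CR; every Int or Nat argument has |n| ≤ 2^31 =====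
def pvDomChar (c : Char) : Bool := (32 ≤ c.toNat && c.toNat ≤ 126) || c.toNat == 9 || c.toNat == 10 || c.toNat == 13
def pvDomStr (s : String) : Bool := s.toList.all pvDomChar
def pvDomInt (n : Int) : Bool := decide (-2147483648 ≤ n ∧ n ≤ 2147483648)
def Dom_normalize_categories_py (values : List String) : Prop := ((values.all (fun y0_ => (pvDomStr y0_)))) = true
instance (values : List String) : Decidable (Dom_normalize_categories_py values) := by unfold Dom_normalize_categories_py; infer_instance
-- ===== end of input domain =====

-- B replaces A's filter + seen-set dedup + final keyed sort by a single pass that keeps one list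
-- sorted by lowercase key with unique keys, inserting each stripped string in place (objective: alternative).


-- ===== PORT A =====
-- values : List String, so Python's `isinstance(item, str)` is always true; `_safe_str(item)` is
-- `item.strip()` (no None in a List String), truthy iff nonempty.
-- A's list comprehension
def pyFilterStrip (values : List String) : List String :=
  values.foldl
    (fun acc item => if PySem.Str.strip item ≠ "" then acc ++ [PySem.Str.strip item] else acc) []

-- A's dedup loop over (dedup, seen)
def pyDedupLoop (normalized : List String) : List String × PySem.Set String :=
  normalized.foldl
    (fun (st : List String × PySem.Set String) item =>
      let key := PySem.Str.lower item
      if PySem.Set.contains st.2 key then st else (st.1 ++ [item], PySem.Set.add st.2 key))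
    ([], PySem.Set.empty)

def normalize_categories_py (values : List String) : List String :=
  PySem.List.sorted (pyDedupLoop (pyFilterStrip values)).1 (fun value => PySem.Str.lower value)

-- ===== PORT B =====
-- B's `_insert_unique`: walk the kept-sorted list; stop on an equal lowercase key (drop the new
-- item), insert in front of the first greater key, else append at the end.
def pvInsertUnique (text key : String) : List String → List String
  | [] => [text]
  | existing :: rest =>
    let existingKey := PySem.Str.lower existing
    if existingKey = key then existing :: rest
    else if key < existingKey then text :: existing :: rest
    else existing :: pvInsertUnique text key rest

def normalize_categories_py_alt (values : List String) : List String :=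
  values.foldl
    (fun ordered item =>
      let text := PySem.Str.strip item
      if text ≠ "" then pvInsertUnique text (PySem.Str.lower text) ordered else ordered)
    []

-- ===== PRECONDITION & SPEC =====
def Spec_normalize_categories_py (values : List String) (out : List String) : Prop := out = normalize_categories_py_alt values
instance (values : List String) (out : List String) : Decidable (Spec_normalize_categories_py values out) := by unfold Spec_normalize_categories_py; infer_instance

-- ===== CLAIM (what is proved, stated in full; the proofs are below) =====
def Claim_equal_normalize_categories_py : Prop := ∀ (values : List String), Dom_normalize_categories_py values → Spec_normalize_categories_py values (normalize_categories_py values)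

-- ===== LEMMAS AND PROOFS =====

-- the filtered list, as a plain filter of the stripped strings
def pvFL (values : List String) : List String :=
  (values.map PySem.Str.strip).filter (fun s => decide (s ≠ ""))

theorem pv_filterStrip_eq (values : List String) (acc : List String) :
    values.foldl
      (fun acc item => if PySem.Str.strip item ≠ "" then acc ++ [PySem.Str.strip item] else acc)
      acc = acc ++ pvFL values := by
  induction values generalizing acc with
  | nil => simp [pvFL]
  | cons v t ih =>
    simp only [List.foldl_cons, pvFL, List.map_cons, List.filter_cons]
    by_cases h : PySem.Str.strip v ≠ ""
    · rw [if_pos h, if_pos (by simpa using h), ih, List.append_assoc]; rfl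
    · rw [if_neg h, if_neg (by simpa using h), ih]; rfl

theorem pv_foldB_eq (values : List String) (ord : List String) :
    values.foldl
      (fun ordered item =>
        let text := PySem.Str.strip item
        if text ≠ "" then pvInsertUnique text (PySem.Str.lower text) ordered else ordered)
      ord =
    (pvFL values).foldl (fun ordered s => pvInsertUnique s (PySem.Str.lower s) ordered) ord := by
  induction values generalizing ord with
  | nil => simp [pvFL]
  | cons v t ih =>
    simp only [List.foldl_cons, pvFL, List.map_cons, List.filter_cons]
    by_cases h : PySem.Str.strip v ≠ ""
    · rw [if_pos h, if_pos (by simpa using h), ih]; rfl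
    · rw [if_neg h, if_neg (by simpa using h), ih]; rfl

-- first-occurrence dedup by key, given the list of already-seen keys (A's loop, seen as a list)
def pvDF {α κ : Type} [DecidableEq κ] (key : α → κ) (seen : List κ) : List α → List α
  | [] => []
  | x :: t => if key x ∈ seen then pvDF key seen t else x :: pvDF key (key x :: seen) t

theorem pv_bridgeA (xs out : List String) (seen : PySem.Set String) (seenL : List String)
    (h : ∀ k : String, k ∈ seen ↔ k ∈ seenL) :
    (List.foldl
      (fun (st : List String × PySem.Set String) item =>
        let key := PySem.Str.lower item
        if PySem.Set.contains st.2 key then st else (st.1 ++ [item], PySem.Set.add st.2 key))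
      (out, seen) xs).1 = out ++ pvDF (fun v => PySem.Str.lower v) seenL xs := by
  induction xs generalizing out seen seenL with
  | nil => simp [pvDF]
  | cons x t ih =>
    by_cases hm : PySem.Str.lower x ∈ seenL
    · have hc : PySem.Set.contains seen (PySem.Str.lower x) = true := by
        simp only [PySem.Set.contains, List.contains_eq_mem, decide_eq_true_eq]
        exact (h _).2 hm
      simp only [List.foldl_cons, pvDF, hc, if_true, if_pos hm]
      exact ih out seen seenL h
    · have hc : PySem.Set.contains seen (PySem.Str.lower x) = false := by
        simp only [PySem.Set.contains, List.contains_eq_mem, decide_eq_false_iff_not]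
        exact fun c => hm ((h _).1 c)
      have h' : ∀ k : String, k ∈ PySem.Set.add seen (PySem.Str.lower x) ↔
          k ∈ PySem.Str.lower x :: seenL := by
        intro k
        rw [PySem.Set.add, if_neg (by simp only [hc]; exact Bool.false_ne_true)]
        simp only [List.mem_append, List.mem_cons, h k]
        tauto
      simp only [List.foldl_cons, pvDF, hc, Bool.false_eq_true, if_false, if_neg hm]
      rw [ih (out ++ [x]) _ (PySem.Str.lower x :: seenL) h', List.append_assoc,
        List.singleton_append]

theorem pv_mem_map_key_pvDF {α κ : Type} [DecidableEq κ] (key : α → κ) (seen : List κ)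
    (ys : List α) (k : κ) :
    k ∈ (pvDF key seen ys).map key ↔ k ∉ seen ∧ k ∈ ys.map key := by
  induction ys generalizing seen with
  | nil => simp [pvDF]
  | cons y t ih =>
    simp only [pvDF]
    by_cases hm : key y ∈ seen
    · rw [if_pos hm, ih seen]
      simp only [List.map_cons, List.mem_cons]
      constructor
      · rintro ⟨h1, h2⟩; exact ⟨h1, Or.inr h2⟩
      · rintro ⟨h1, h2 | h2⟩
        · exact absurd (h2 ▸ hm) h1
        · exact ⟨h1, h2⟩
    · rw [if_neg hm]
      simp only [List.map_cons, List.mem_cons, ih]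
      constructor
      · rintro (rfl | ⟨h1, h2⟩)
        · exact ⟨hm, Or.inl rfl⟩
        · exact ⟨fun c => h1 (Or.inr c), Or.inr h2⟩
      · rintro ⟨h1, rfl | h2⟩
        · exact Or.inl rfl
        · by_cases hk : k = key y
          · exact Or.inl hk
          · exact Or.inr ⟨by simp [hk, h1], h2⟩

theorem pv_nodup_map_key_pvDF {α κ : Type} [DecidableEq κ] (key : α → κ) (seen : List κ)
    (ys : List α) : ((pvDF key seen ys).map key).Nodup := by
  induction ys generalizing seen with
  | nil => simp [pvDF]
  | cons y t ih =>
    simp only [pvDF]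
    by_cases hm : key y ∈ seen
    · rw [if_pos hm]; exact ih seen
    · rw [if_neg hm]
      simp only [List.map_cons, List.nodup_cons]
      refine ⟨fun c => ?_, ih _⟩
      exact ((pv_mem_map_key_pvDF key _ t (key y)).1 c).1 (by simp)

-- appending one element to A's dedup input
theorem pv_pvDF_append {α κ : Type} [DecidableEq κ] (key : α → κ) (seen : List κ)
    (l : List α) (x : α) :
    pvDF key seen (l ++ [x]) =
      pvDF key seen l ++ (if key x ∈ seen ∨ key x ∈ l.map key then [] else [x]) := by
  induction l generalizing seen with
  | nil =>
    simp only [List.nil_append, pvDF, List.map_nil, List.not_mem_nil, or_false]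
  | cons y t ih =>
    simp only [List.cons_append, pvDF]
    by_cases hm : key y ∈ seen
    · rw [if_pos hm, if_pos hm, ih seen]
      congr 1
      by_cases hxy : key x = key y
      · simp [hxy, hm]
      · simp only [List.map_cons, List.mem_cons]
        congr 1
        simp [hxy]
    · rw [if_neg hm, if_neg hm, ih (key y :: seen), List.cons_append]
      congr 2
      simp only [List.mem_cons, List.map_cons]
      by_cases hxy : key x = key y <;> simp [hxy]

-- B's insert leaves the list unchanged when its key is already present (list strictly key-sorted)
theorem pv_ins_mem_eq (x : String) (u : List String)
    (hs : u.Pairwise (fun a b => PySem.Str.lower a < PySem.Str.lower b))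
    (hmem : PySem.Str.lower x ∈ u.map PySem.Str.lower) :
    pvInsertUnique x (PySem.Str.lower x) u = u := by
  induction u with
  | nil => simp at hmem
  | cons e t ih =>
    simp only [pvInsertUnique]
    by_cases he : PySem.Str.lower e = PySem.Str.lower x
    · rw [if_pos he]
    · rw [if_neg he]
      have hmt : PySem.Str.lower x ∈ t.map PySem.Str.lower := by
        have hmem' : PySem.Str.lower x = PySem.Str.lower e ∨
            PySem.Str.lower x ∈ t.map PySem.Str.lower := by simpa using hmem
        rcases hmem' with h | h
        · exact absurd h.symm he
        · exact h
      obtain ⟨y, hy, hky⟩ := List.mem_map.1 hmt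
      have helt : PySem.Str.lower e < PySem.Str.lower x := by
        have := (List.pairwise_cons.1 hs).1 y hy
        rw [hky] at this
        exact this
      rw [if_neg (by exact fun c => absurd c (not_lt_of_gt helt))]
      rw [ih (List.pairwise_cons.1 hs).2 hmt]

-- B's insert is a permutation of appending, when the key is new
theorem pv_ins_perm (x k : String) (u : List String)
    (hnew : ∀ e ∈ u, PySem.Str.lower e ≠ k) :
    (pvInsertUnique x k u).Perm (u ++ [x]) := by
  induction u with
  | nil => simp [pvInsertUnique]
  | cons e t ih =>
    simp only [pvInsertUnique]
    rw [if_neg (hnew e (by simp))]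
    by_cases hlt : k < PySem.Str.lower e
    · rw [if_pos hlt]
      exact (List.Perm.swap e x t).trans
        (List.Perm.cons e (List.perm_append_singleton x t).symm)
    · rw [if_neg hlt]
      exact (ih (fun y hy => hnew y (by simp [hy]))).cons e

-- B's insert preserves strict sortedness, when the key is new
theorem pv_ins_pairwise (x : String) (u : List String)
    (hs : u.Pairwise (fun a b => PySem.Str.lower a < PySem.Str.lower b))
    (hnew : ∀ e ∈ u, PySem.Str.lower e ≠ PySem.Str.lower x) :
    (pvInsertUnique x (PySem.Str.lower x) u).Pairwise
      (fun a b => PySem.Str.lower a < PySem.Str.lower b) := by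
  induction u with
  | nil => simp [pvInsertUnique]
  | cons e t ih =>
    simp only [pvInsertUnique]
    rw [if_neg (hnew e (by simp))]
    by_cases hlt : PySem.Str.lower x < PySem.Str.lower e
    · rw [if_pos hlt]
      refine List.pairwise_cons.2 ⟨?_, hs⟩
      intro b hb
      rcases List.mem_cons.1 hb with rfl | hb'
      · exact hlt
      · exact lt_trans hlt ((List.pairwise_cons.1 hs).1 b hb')
    · rw [if_neg hlt]
      have helt : PySem.Str.lower e < PySem.Str.lower x :=
        lt_of_le_of_ne (not_lt.1 hlt) (hnew e (by simp))
      refine List.pairwise_cons.2 ⟨?_, ih (List.pairwise_cons.1 hs).2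
        (fun y hy => hnew y (by simp [hy]))⟩
      intro b hb
      have hb' := (List.Perm.mem_iff (pv_ins_perm x (PySem.Str.lower x) t
        (fun y hy => hnew y (by simp [hy])))).1 hb
      rcases List.mem_append.1 hb' with hb'' | hb''
      · exact (List.pairwise_cons.1 hs).1 b hb''
      · simp only [List.mem_singleton] at hb''
        subst hb''
        exact helt

-- the core: B's fold of sorted-unique inserts computes sorted(first-occurrence dedup)
theorem pv_fold_ins (L : List String) :
    L.foldl (fun ordered s => pvInsertUnique s (PySem.Str.lower s) ordered) [] =
      PySem.List.sorted (pvDF (fun v => PySem.Str.lower v) [] L)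
        (fun value => PySem.Str.lower value) := by
  induction L using List.reverseRecOn with
  | nil => rfl
  | append_singleton L x ih =>
    rw [List.foldl_append, List.foldl_cons, List.foldl_nil, ih,
      pv_pvDF_append (fun v => PySem.Str.lower v) [] L x]
    have hperm := PySem.List.sorted_perm (pvDF (fun v => PySem.Str.lower v) [] L)
      (fun value => PySem.Str.lower value) false
    have hpw := PySem.List.sorted_pairwise (pvDF (fun v => PySem.Str.lower v) [] L)
      (fun value => PySem.Str.lower value)
    have hnd : ((PySem.List.sorted (pvDF (fun v => PySem.Str.lower v) [] L)
        (fun value => PySem.Str.lower value)).map PySem.Str.lower).Nodup :=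
      ((hperm.map PySem.Str.lower).nodup_iff).2
        (pv_nodup_map_key_pvDF (fun v => PySem.Str.lower v) [] L)
    have hstrict : (PySem.List.sorted (pvDF (fun v => PySem.Str.lower v) [] L)
        (fun value => PySem.Str.lower value)).Pairwise
        (fun a b => PySem.Str.lower a < PySem.Str.lower b) := by
      have h2 := List.pairwise_map.1 hnd
      exact (hpw.and h2).imp (fun h => lt_of_le_of_ne h.1 h.2)
    by_cases hmem : PySem.Str.lower x ∈ L.map (fun v => PySem.Str.lower v)
    · rw [if_pos (Or.inr hmem), List.append_nil]
      have : PySem.Str.lower x ∈ (PySem.List.sorted (pvDF (fun v => PySem.Str.lower v) [] L)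
          (fun value => PySem.Str.lower value)).map PySem.Str.lower := by
        refine (hperm.map PySem.Str.lower).mem_iff.2 ?_
        exact (pv_mem_map_key_pvDF (fun v => PySem.Str.lower v) [] L _).2 ⟨by simp, hmem⟩
      exact pv_ins_mem_eq x _ hstrict this
    · rw [if_neg (by simp [hmem])]
      have hnew : ∀ e ∈ PySem.List.sorted (pvDF (fun v => PySem.Str.lower v) [] L)
          (fun value => PySem.Str.lower value), PySem.Str.lower e ≠ PySem.Str.lower x := by
        intro e he hc
        apply hmem
        have : PySem.Str.lower e ∈ (pvDF (fun v => PySem.Str.lower v) [] L).map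
            (fun v => PySem.Str.lower v) := List.mem_map_of_mem (hperm.mem_iff.1 he)
        rw [hc] at this
        exact ((pv_mem_map_key_pvDF (fun v => PySem.Str.lower v) [] L _).1 this).2
      refine (PySem.List.sorted_eq_of_perm_of_pairwise_lt _ _ _ ?_ ?_).symm
      · exact (pv_ins_perm x (PySem.Str.lower x) _ hnew).trans
          (hperm.append (List.Perm.refl [x]))
      · exact pv_ins_pairwise x _ hstrict hnew

-- ===== VERDICT (by name: the statement is the Claim_ definition above) =====
theorem normalize_categories_py_spec : Claim_equal_normalize_categories_py := by
  intro values _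
  unfold Spec_normalize_categories_py normalize_categories_py normalize_categories_py_alt
    pyDedupLoop pyFilterStrip
  rw [pv_bridgeA _ [] PySem.Set.empty [] (by intro k; simp [PySem.Set.empty]),
    pv_filterStrip_eq values [], pv_foldB_eq values [], pv_fold_ins]
  simp
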